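-- pv_equiv track=rewrite | github.com/Shaybush/test-2021-summer | ex_3.py | is_copy_k
-- ===== SOURCE A (Python) =====
-- def is_copy_k(s1, s2):
--   k = 0
--   count = 0
--   if len(s1) % len(s2) != 0:
--     return 0
--   for i in range(len(s1)):
--     if s2[i % len(s2)] == s1[i]:
--       count += 1
--     else:
--       return 0
--
--     if count == len(s2):
--       k += 1
--       count = 0
--   return k
-- ===== SOURCE B (Python) =====
-- def is_copy_k(s1, s2):
--     if len(s1) % len(s2) != 0:
--         return 0
--     k = len(s1) // len(s2)
--     return k if s2 * k == s1 else 0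
-- ===== Notes on version B (the rewrite author's own statement) =====
-- stated objective: faster
-- what changed: Replaces the char-by-char modular-index loop with counter/reset accumulators by computing k = len(s1)//len(s2) once and testing s2 * k == s1 with a single whole-string construction and comparison.
import Mathlib
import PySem

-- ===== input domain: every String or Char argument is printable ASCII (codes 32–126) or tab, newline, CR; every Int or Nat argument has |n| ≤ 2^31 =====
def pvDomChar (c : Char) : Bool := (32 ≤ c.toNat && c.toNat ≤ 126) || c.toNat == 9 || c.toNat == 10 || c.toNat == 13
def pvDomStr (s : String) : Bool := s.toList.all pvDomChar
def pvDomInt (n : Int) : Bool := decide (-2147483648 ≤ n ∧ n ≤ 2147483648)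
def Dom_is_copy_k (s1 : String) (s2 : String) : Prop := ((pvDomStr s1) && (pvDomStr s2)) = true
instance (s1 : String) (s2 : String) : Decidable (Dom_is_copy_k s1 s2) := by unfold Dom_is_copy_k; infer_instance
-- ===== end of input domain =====

-- B replaces A's char-by-char modular-index loop by one whole-string build-and-compare; measurably faster by a constant factor in Python.

-- ===== PORT A =====
-- Loop state (k, count) over the indices i of s1; s2[i % len(s2)] and s1[i] are
-- always in range here (i < len(s1), 0 ≤ i % len(s2) < len(s2)), so getD is exact.
def isCopyKLoop (l1 l2 : List Char) : List Nat → Int → Int → Int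
  | [], k, _ => k
  | i :: rest, k, count =>
    if l2.getD (i % l2.length) ' ' == l1.getD i ' ' then
      -- count += 1; if count == len(s2): k += 1; count = 0
      if count + 1 = (l2.length : Int) then isCopyKLoop l1 l2 rest (k + 1) 0
      else isCopyKLoop l1 l2 rest k (count + 1)
    else 0

def is_copy_k (s1 : String) (s2 : String) : Int :=
  let l1 := s1.toList
  let l2 := s2.toList
  -- len(s1) % len(s2) on nonnegative lengths: Nat mod is exact
  if l1.length % l2.length ≠ 0 then 0
  else isCopyKLoop l1 l2 (List.range l1.length) 0 0

-- ===== PORT B =====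
def is_copy_k_alt (s1 : String) (s2 : String) : Int :=
  let l1 := s1.toList
  let l2 := s2.toList
  if l1.length % l2.length ≠ 0 then 0
  else
    -- k = len(s1) // len(s2) on nonnegative lengths: Nat division is exact
    let k := l1.length / l2.length
    -- s2 * k == s1
    if (List.replicate k l2).flatten = l1 then (k : Int) else 0

-- ===== PRECONDITION & SPEC =====
-- Pre_ excludes exactly s2 = "", where Python A raises ZeroDivisionError (len(s1) % len(s2)).
def Pre_is_copy_k (s1 : String) (s2 : String) : Prop := s2 ≠ ""
instance (s1 : String) (s2 : String) : Decidable (Pre_is_copy_k s1 s2) := by unfold Pre_is_copy_k; infer_instance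

def pvWitness_is_copy_k : String × String := ("abab", "ab")

def Spec_is_copy_k (s1 : String) (s2 : String) (out : Int) : Prop := out = is_copy_k_alt s1 s2
instance (s1 : String) (s2 : String) (out : Int) : Decidable (Spec_is_copy_k s1 s2 out) := by unfold Spec_is_copy_k; infer_instance

-- ===== CLAIM (what is proved, stated in full; the proofs are below) =====
def Claim_equal_is_copy_k : Prop := ∀ (s1 : String) (s2 : String), Dom_is_copy_k s1 s2 → Pre_is_copy_k s1 s2 → Spec_is_copy_k s1 s2 (is_copy_k s1 s2)

-- ===== LEMMAS AND PROOFS =====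

-- arithmetic: stepping j ↦ j+1 when the current block becomes full / stays partial
lemma pv_step_full (m j : Nat) (hm : 0 < m) (h : j % m + 1 = m) :
    (j + 1) / m = j / m + 1 ∧ (j + 1) % m = 0 := by
  have hd := Nat.div_add_mod j m
  have h1 : j + 1 = m * (j / m + 1) := by rw [Nat.mul_add, Nat.mul_one]; omega
  exact ⟨by rw [h1, Nat.mul_div_cancel_left _ hm], by rw [h1, Nat.mul_mod_right]⟩

lemma pv_step_part (m j : Nat) (hm : 0 < m) (h : j % m + 1 ≠ m) :
    (j + 1) / m = j / m ∧ (j + 1) % m = j % m + 1 := by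
  have hd := Nat.div_add_mod j m
  have hlt : j % m + 1 < m := by have := Nat.mod_lt j hm; omega
  have h1 : j + 1 = m * (j / m) + (j % m + 1) := by omega
  constructor
  · rw [h1, Nat.mul_add_div hm, Nat.div_eq_of_lt hlt, Nat.add_zero]
  · rw [h1, Nat.mul_add_mod, Nat.mod_eq_of_lt hlt]

-- the loop, started at index j in the invariant state (k, count) = (j / m, j % m),
-- returns (j+len)/m if every remaining position matches s2 cyclically, else 0
lemma pv_loop_eq (l1 l2 : List Char) (hm : 0 < l2.length) :
    ∀ (len j : Nat),
      isCopyKLoop l1 l2 (List.range' j len) ((j / l2.length : Nat) : Int) ((j % l2.length : Nat) : Int)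
        = if (∀ t, t < len → l1.getD (j + t) ' ' = l2.getD ((j + t) % l2.length) ' ')
          then (((j + len) / l2.length : Nat) : Int) else 0 := by
  intro len
  induction len with
  | zero => intro j; simp [isCopyKLoop]
  | succ n ih =>
    intro j
    rw [List.range'_succ]
    by_cases hc : l2.getD (j % l2.length) ' ' = l1.getD j ' '
    · have hceq : (l2.getD (j % l2.length) ' ' == l1.getD j ' ') = true := beq_iff_eq.mpr hc
      have hcond : (∀ t, t < n → l1.getD (j + 1 + t) ' ' = l2.getD ((j + 1 + t) % l2.length) ' ')
          ↔ (∀ t, t < n + 1 → l1.getD (j + t) ' ' = l2.getD ((j + t) % l2.length) ' ') := by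
        constructor
        · intro h t ht
          rcases t with _ | t
          · simpa using hc.symm
          · have := h t (by omega)
            have he : j + 1 + t = j + (t + 1) := by omega
            rwa [he] at this
        · intro h t ht
          have := h (t + 1) (by omega)
          have he : j + (t + 1) = j + 1 + t := by omega
          rwa [he] at this
      have hlen : j + 1 + n = j + (n + 1) := by omega
      by_cases hfull : j % l2.length + 1 = l2.length
      · have hint : ((j % l2.length : Nat) : Int) + 1 = (l2.length : Int) := by exact_mod_cast hfull
        obtain ⟨hdiv, hmod⟩ := pv_step_full l2.length j hm hfull
        have hih := ih (j + 1)
        rw [hdiv, hmod] at hih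
        simp only [hcond, hlen] at hih
        have hcast : ((j / l2.length + 1 : Nat) : Int) = ((j / l2.length : Nat) : Int) + 1 := by
          push_cast; ring
        rw [hcast, Nat.cast_zero] at hih
        simp only [isCopyKLoop, hceq, if_true]
        rw [if_pos hint]
        exact hih
      · have hint : ((j % l2.length : Nat) : Int) + 1 ≠ (l2.length : Int) := by
          intro hco; exact hfull (by exact_mod_cast hco)
        obtain ⟨hdiv, hmod⟩ := pv_step_part l2.length j hm hfull
        have hih := ih (j + 1)
        rw [hdiv, hmod] at hih
        simp only [hcond, hlen] at hih
        have hcast : ((j % l2.length + 1 : Nat) : Int) = ((j % l2.length : Nat) : Int) + 1 := by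
          push_cast; ring
        rw [hcast] at hih
        simp only [isCopyKLoop, hceq, if_true]
        rw [if_neg hint]
        exact hih
    · have hnall : ¬ (∀ t, t < n + 1 → l1.getD (j + t) ' ' = l2.getD ((j + t) % l2.length) ' ') := by
        intro hall
        exact hc (by simpa using (hall 0 (by omega)).symm)
      have hne : (l2.getD (j % l2.length) ' ' == l1.getD j ' ') = false := by
        simpa using hc
      simp only [isCopyKLoop, hne, Bool.false_eq_true, if_false]
      rw [if_neg hnall]

lemma pv_length_flatten_replicate (l : List Char) :
    ∀ q, (List.replicate q l).flatten.length = q * l.length := by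
  intro q
  induction q with
  | zero => simp
  | succ q ih => simp only [List.replicate_succ, List.flatten_cons, List.length_append, ih]; ring

lemma pv_getD_flatten_replicate (l : List Char) :
    ∀ (q i : Nat), i < q * l.length → (List.replicate q l).flatten.getD i ' ' = l.getD (i % l.length) ' ' := by
  intro q
  induction q with
  | zero => intro i h; simp at h
  | succ q ih =>
    intro i h
    rw [List.replicate_succ, List.flatten_cons]
    by_cases hi : i < l.length
    · rw [List.getD_append _ _ _ _ hi, Nat.mod_eq_of_lt hi]
    · have hge : l.length ≤ i := by omega
      rw [List.getD_append_right _ _ _ _ hge]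
      have hmul : (q + 1) * l.length = q * l.length + l.length := by ring
      have hlt : i - l.length < q * l.length := by omega
      rw [ih _ hlt]
      congr 1
      conv_rhs => rw [show i = (i - l.length) + l.length from by omega]
      rw [Nat.add_mod_right]

-- B's whole-string comparison equals A's positionwise cyclic condition
lemma pv_flatten_iff (l1 l2 : List Char) (q : Nat) (hn : l1.length = q * l2.length) :
    ((List.replicate q l2).flatten = l1)
      ↔ (∀ t, t < l1.length → l1.getD t ' ' = l2.getD (t % l2.length) ' ') := by
  constructor
  · intro h t ht
    rw [← h, pv_getD_flatten_replicate l2 q t (by omega)]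
  · intro h
    apply List.ext_getElem (by rw [pv_length_flatten_replicate, hn])
    intro i h1 h2
    have hi : i < q * l2.length := by rwa [pv_length_flatten_replicate] at h1
    have e1 : (List.replicate q l2).flatten.getD i ' ' = l2.getD (i % l2.length) ' ' :=
      pv_getD_flatten_replicate l2 q i hi
    have e2 := h i h2
    rw [List.getD_eq_getElem _ _ h1] at e1
    rw [List.getD_eq_getElem _ _ h2] at e2
    rw [e1, e2]

-- ===== VERDICT (by name: the statement is the Claim_ definition above) =====
theorem is_copy_k_spec : Claim_equal_is_copy_k := by
  intro s1 s2 _ hpre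
  unfold Spec_is_copy_k is_copy_k is_copy_k_alt
  have hm : 0 < s2.toList.length := by
    rcases h : s2.toList with _ | ⟨c, cs⟩
    · exact absurd (by simpa using congrArg String.ofList h) hpre
    · simp
  set l1 := s1.toList with hl1
  set l2 := s2.toList with hl2
  by_cases hmod : l1.length % l2.length ≠ 0
  · simp [hmod]
  · rw [not_not] at hmod
    simp only [hmod, ne_eq, not_true_eq_false, if_false]
    have hd := Nat.div_add_mod l1.length l2.length
    have hq : l1.length = l1.length / l2.length * l2.length := by
      rw [Nat.mul_comm]; omega
    have hloop := pv_loop_eq l1 l2 hm l1.length 0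
    rw [List.range_eq_range']
    simp only [Nat.zero_div, Nat.zero_mod, Nat.cast_zero, zero_add] at hloop
    rw [hloop]
    simp only [pv_flatten_iff l1 l2 (l1.length / l2.length) hq]
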